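-- pv_equiv track=rewrite | github.com/hesh64/Algos | structs/tree/left_right_sum.py | sum_subtrees
-- ===== SOURCE A (Python) =====
-- def sum_subtrees(a):
--     if len(a) == 0:
--         return 0
--
--     left_sum, right_sum = 0, 0
--     pos = pow = 1
--
--     while True:
--         start = pos
--         end = start + 2 ** pow
--         break_after_this = end >= len(a)
--         end = min(len(a), end)
--
--         for i in range(start, min(start + (2 ** pow) // 2, len(a))):
--             if a[i] != -1:
--                 left_sum += a[i]
--
--         for j in range(min(start + (2 ** pow) // 2, len(a)), end):
--             if a[j] != -1:
--                 right_sum += a[j]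
--
--         if break_after_this:
--             break
--
--         pos += 2 ** pow
--         pow += 1
--
--     return left_sum, right_sum
-- ===== SOURCE B (Python) =====
-- def sum_subtrees(a):
--     if len(a) == 0:
--         return 0
--
--     def s(i):
--         if i >= len(a):
--             return 0
--         return (a[i] if a[i] != -1 else 0) + s(2 * i + 1) + s(2 * i + 2)
--
--     return s(1), s(2)
-- ===== Notes on version B (the rewrite author's own statement) =====
-- stated objective: idiomatic
-- what changed: Replaces the level-by-level while loop with explicit power-of-two range bookkeeping by a simple recursion over heap indices: the answer is (s(1), s(2)) where s(i) sums the subtree rooted at index i, descending through -1 placeholders.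
-- outside the precondition, e.g. on sum_subtrees([]): A returns 0, B returns 0
import Mathlib
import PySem

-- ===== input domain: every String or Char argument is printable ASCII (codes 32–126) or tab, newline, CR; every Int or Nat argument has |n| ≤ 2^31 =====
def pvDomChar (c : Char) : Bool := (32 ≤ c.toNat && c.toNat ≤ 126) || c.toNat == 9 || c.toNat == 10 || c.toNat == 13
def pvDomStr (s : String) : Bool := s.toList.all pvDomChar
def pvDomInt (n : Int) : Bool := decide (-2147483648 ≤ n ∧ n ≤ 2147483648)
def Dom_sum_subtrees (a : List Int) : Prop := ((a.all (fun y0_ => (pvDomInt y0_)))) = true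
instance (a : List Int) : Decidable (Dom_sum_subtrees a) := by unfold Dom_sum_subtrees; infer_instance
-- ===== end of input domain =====

-- B replaces A's level-by-level while loop by a recursion over heap indices (idiomatic); equality of
-- RETURN values is claimed on nonempty lists (Pre_): on [] Python A returns the bare int 0, not a pair.

-- ===== PORT A =====
-- the two inner `for` loops of A: fold of `if a[i] != -1: acc += a[i]` over range(lo, lo+n)
def pvForA (a : List Int) (lo n : Nat) (acc : Int) : Int :=
  (List.range' lo n).foldl (fun s i => if a.getD i 0 ≠ -1 then s + a.getD i 0 else s) acc

-- A's `while True` loop; the Python break flag becomes the `if a.length ≤ e` branch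
def pvLoopA (a : List Int) (pos pow : Nat) (ls rs : Int) : Int × Int :=
  let start := pos
  let e := start + 2 ^ pow
  let mid := min (start + 2 ^ pow / 2) a.length
  let e' := min a.length e
  let ls' := pvForA a start (mid - start) ls
  let rs' := pvForA a mid (e' - mid) rs
  if a.length ≤ e then (ls', rs')
  else pvLoopA a (pos + 2 ^ pow) (pow + 1) ls' rs'
termination_by a.length - pos
decreasing_by
  have h1 : 1 ≤ 2 ^ pow := Nat.one_le_two_pow
  simp only [not_le] at *; omega

def sum_subtrees (a : List Int) : Int × Int :=
  if a.length = 0 then (0, 0)   -- Python returns the bare int 0 here; outside Pre_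
  else pvLoopA a 1 1 0 0

-- ===== PORT B =====
-- B's recursive helper s(i): subtree sum at heap index i, skipping -1 values but not their descendants
def pvS (a : List Int) (i : Nat) : Int :=
  if i < a.length then
    (if a.getD i 0 ≠ -1 then a.getD i 0 else 0) + pvS a (2 * i + 1) + pvS a (2 * i + 2)
  else 0
termination_by a.length - i
decreasing_by all_goals omega

def sum_subtrees_alt (a : List Int) : Int × Int :=
  if a.length = 0 then (0, 0)   -- Python returns the bare int 0 here; outside Pre_
  else (pvS a 1, pvS a 2)

-- ===== PRECONDITION & SPEC =====
-- Pre_ excludes only the empty list, on which Python A (and B) return the bare int 0, which is not a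
-- value of the declared pair type Int × Int.
def Pre_sum_subtrees (a : List Int) : Prop := a ≠ []
instance (a : List Int) : Decidable (Pre_sum_subtrees a) := by unfold Pre_sum_subtrees; infer_instance

def pvWitness_sum_subtrees : List Int := [3, 1, -1, 4, 1, 5, 9]

def Spec_sum_subtrees (a : List Int) (out : Int × Int) : Prop := out = sum_subtrees_alt a
instance (a : List Int) (out : Int × Int) : Decidable (Spec_sum_subtrees a out) := by unfold Spec_sum_subtrees; infer_instance

-- ===== CLAIM (what is proved, stated in full; the proofs are below) =====
def Claim_equal_sum_subtrees : Prop := ∀ (a : List Int), Dom_sum_subtrees a → Pre_sum_subtrees a → Spec_sum_subtrees a (sum_subtrees a)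

-- ===== LEMMAS AND PROOFS =====

-- value contributed by index j (0 outside the array, -1 entries skipped)
def pvV (a : List Int) (j : Nat) : Int :=
  if j < a.length then (if a.getD j 0 ≠ -1 then a.getD j 0 else 0) else 0

-- sum of contributed values over a block of n consecutive indices starting at lo
def pvVSum (a : List Int) (lo n : Nat) : Int := ((List.range' lo n).map (pvV a)).sum

-- sum of B's subtree sums over a block of n consecutive indices starting at lo
def pvRSum (a : List Int) (lo n : Nat) : Int := ((List.range' lo n).map (pvS a)).sum

theorem pvS_zero (a : List Int) (i : Nat) (h : a.length ≤ i) : pvS a i = 0 := by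
  unfold pvS; simp [Nat.not_lt.mpr h]

theorem pvS_unfold (a : List Int) (i : Nat) :
    pvS a i = pvV a i + pvS a (2 * i + 1) + pvS a (2 * i + 2) := by
  by_cases h : i < a.length
  · rw [pvS]; simp [pvV, h]
  · rw [pvS_zero a i (by omega), pvS_zero a (2*i+1) (by omega), pvS_zero a (2*i+2) (by omega)]
    simp [pvV, h]

theorem pvVSum_zero (a : List Int) (lo n : Nat) (h : a.length ≤ lo) : pvVSum a lo n = 0 := by
  induction n generalizing lo with
  | zero => simp [pvVSum]
  | succ n ih =>
    simp only [pvVSum, List.range'_succ, List.map_cons, List.sum_cons] at *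
    rw [ih (lo+1) (by omega)]
    simp [pvV, Nat.not_lt.mpr h]

theorem pvRSum_zero (a : List Int) (lo n : Nat) (h : a.length ≤ lo) : pvRSum a lo n = 0 := by
  induction n generalizing lo with
  | zero => simp [pvRSum]
  | succ n ih =>
    simp only [pvRSum, List.range'_succ, List.map_cons, List.sum_cons] at *
    rw [ih (lo+1) (by omega), pvS_zero a lo h]
    simp

theorem pvVSum_split (a : List Int) (lo m n : Nat) :
    pvVSum a lo (m + n) = pvVSum a lo m + pvVSum a (lo + m) n := by
  induction m generalizing lo with
  | zero => simp [pvVSum]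
  | succ m ih =>
    have e : m + 1 + n = (m + n) + 1 := by omega
    simp only [e, pvVSum, List.range'_succ, List.map_cons, List.sum_cons] at *
    have e2 : lo + 1 + m = lo + (m + 1) := by omega
    rw [ih (lo+1), e2]
    ring

-- a block of subtree sums = its own level's values plus the block of its children
theorem pvRSum_step (a : List Int) (lo n : Nat) :
    pvRSum a lo n = pvVSum a lo n + pvRSum a (2 * lo + 1) (2 * n) := by
  induction n generalizing lo with
  | zero => simp [pvRSum, pvVSum]
  | succ n ih =>
    have h2 : 2 * (n + 1) = (2 * n) + 1 + 1 := by omega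
    rw [h2]
    simp only [pvRSum, pvVSum, List.range'_succ, List.map_cons, List.sum_cons] at *
    have e1 : 2 * lo + 1 + 1 + 1 = 2 * (lo + 1) + 1 := by omega
    have e2 : 2 * lo + 1 + 1 = 2 * lo + 2 := by omega
    rw [e1, e2, pvS_unfold a lo, ih (lo + 1)]
    ring

-- A's inner for loop computes acc plus the block value sum, when the block stays inside the array
theorem pvForA_eq (a : List Int) (n : Nat) : ∀ (lo : Nat) (acc : Int), lo + n ≤ a.length →
    pvForA a lo n acc = acc + pvVSum a lo n := by
  induction n with
  | zero => intro lo acc _; simp [pvForA, pvVSum]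
  | succ n ih =>
    intro lo acc h
    simp only [pvForA, pvVSum, List.range'_succ, List.map_cons, List.sum_cons, List.foldl_cons] at *
    rw [ih (lo+1) _ (by omega)]
    have hlo : lo < a.length := by omega
    simp only [pvV, if_pos hlo]
    split_ifs <;> ring

-- result of one final (break) iteration of the while loop
theorem pvLoopA_break (a : List Int) (k h : Nat) (ls rs : Int)
    (hk : 2 ^ k = 2 * h) (h1 : 1 ≤ h) (hbr : a.length ≤ 2 * h - 1 + 2 ^ k) :
    pvLoopA a (2 * h - 1) k ls rs =
      (ls + pvRSum a (2 * h - 1) h, rs + pvRSum a (3 * h - 1) h) := by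
  rw [hk] at hbr
  rw [pvLoopA]
  simp only [hk, if_pos (by omega : a.length ≤ 2 * h - 1 + 2 * h)]
  have hmid : min (2 * h - 1 + 2 * h / 2) a.length = min (3 * h - 1) a.length := by omega
  have hmin : min a.length (2 * h - 1 + 2 * h) = a.length := by omega
  rw [hmid, hmin]
  simp only [Prod.mk.injEq]
  constructor
  · -- left accumulator: values of [2h-1, 3h-1) clipped at a.length
    rw [pvRSum_step a (2*h-1) h, pvRSum_zero a (2*(2*h-1)+1) (2*h) (by omega)]
    by_cases hc : 3 * h - 1 ≤ a.length
    · rw [min_eq_left hc]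
      have e : 3*h-1 - (2*h-1) = h := by omega
      rw [e, pvForA_eq a h (2*h-1) ls (by omega)]
      ring
    · rw [min_eq_right (by omega)]
      by_cases hc2 : 2*h-1 ≤ a.length
      · rw [pvForA_eq a (a.length - (2*h-1)) (2*h-1) ls (by omega)]
        have hsp := pvVSum_split a (2*h-1) (a.length - (2*h-1)) (h - (a.length - (2*h-1)))
        have e : a.length - (2*h-1) + (h - (a.length - (2*h-1))) = h := by omega
        rw [e] at hsp
        rw [hsp, pvVSum_zero a (2*h-1 + (a.length - (2*h-1))) _ (by omega)]
        ring
      · have e : a.length - (2*h-1) = 0 := by omega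
        rw [e, pvVSum_zero a (2*h-1) h (by omega)]
        simp [pvForA]
  · -- right accumulator: values of [3h-1, 4h-1) clipped at a.length
    rw [pvRSum_step a (3*h-1) h, pvRSum_zero a (2*(3*h-1)+1) (2*h) (by omega)]
    by_cases hc : 3 * h - 1 ≤ a.length
    · rw [min_eq_left hc]
      rw [pvForA_eq a (a.length - (3*h-1)) (3*h-1) rs (by omega)]
      have hsp := pvVSum_split a (3*h-1) (a.length - (3*h-1)) (h - (a.length - (3*h-1)))
      have e : a.length - (3*h-1) + (h - (a.length - (3*h-1))) = h := by omega
      rw [e] at hsp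
      rw [hsp, pvVSum_zero a (3*h-1 + (a.length - (3*h-1))) _ (by omega)]
      ring
    · rw [min_eq_right (by omega)]
      have e : a.length - a.length = 0 := by omega
      rw [e, pvVSum_zero a (3*h-1) h (by omega)]
      simp [pvForA]

-- the while-loop invariant, stated with h = 2^(pow-1); fuel m bounds the remaining iterations
theorem pvLoopA_inv (a : List Int) (m : Nat) : ∀ (k h : Nat) (ls rs : Int),
    2 ^ k = 2 * h → 1 ≤ h → a.length ≤ 4 * h - 1 + m →
    pvLoopA a (2 * h - 1) k ls rs =
      (ls + pvRSum a (2 * h - 1) h, rs + pvRSum a (3 * h - 1) h) := by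
  induction m with
  | zero =>
    intro k h ls rs hk h1 hm
    exact pvLoopA_break a k h ls rs hk h1 (by rw [hk]; omega)
  | succ m ih =>
    intro k h ls rs hk h1 hm
    by_cases hbr : a.length ≤ 2 * h - 1 + 2 ^ k
    · exact pvLoopA_break a k h ls rs hk h1 hbr
    · rw [pvLoopA]
      rw [hk] at hbr
      simp only [hk, if_neg hbr]
      have hmid : min (2 * h - 1 + 2 * h / 2) a.length = 3 * h - 1 := by omega
      have hmin : min a.length (2 * h - 1 + 2 * h) = 2 * h - 1 + 2 * h := by omega
      rw [hmid, hmin]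
      have hpos : 2 * h - 1 + 2 * h = 2 * (2 * h) - 1 := by omega
      rw [hpos, ih (k+1) (2*h) _ _ (by rw [pow_succ, hk]; ring) (by omega) (by omega)]
      have e3 : 3*h-1 - (2*h-1) = h := by omega
      have e4 : 2 * (2 * h) - 1 - (3*h-1) = h := by omega
      rw [e3, e4]
      rw [pvForA_eq a h (2*h-1) ls (by omega), pvForA_eq a h (3*h-1) rs (by omega)]
      rw [pvRSum_step a (2*h-1) h, pvRSum_step a (3*h-1) h]
      have e1 : 2 * (2*h-1) + 1 = 2 * (2*h) - 1 := by omega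
      have e2 : 2 * (3*h-1) + 1 = 3 * (2*h) - 1 := by omega
      rw [e1, e2]
      simp only [Prod.mk.injEq]
      constructor <;> ring

-- pvRSum over a single index is pvS there
theorem pvRSum_one (a : List Int) (lo : Nat) : pvRSum a lo 1 = pvS a lo := by
  simp [pvRSum, List.range'_one]

-- ===== VERDICT (by name: the statement is the Claim_ definition above) =====
theorem sum_subtrees_spec : Claim_equal_sum_subtrees := by
  intro a _ hpre
  unfold Spec_sum_subtrees sum_subtrees sum_subtrees_alt
  have hne : a.length ≠ 0 := by
    intro h; exact hpre (List.eq_nil_of_length_eq_zero h)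
  rw [if_neg hne, if_neg hne]
  have := pvLoopA_inv a a.length 1 1 0 0 (by norm_num) (by omega) (by omega)
  simpa [pvRSum_one] using this
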